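-- pv_equiv track=rewrite | github.com/villanuevaeliusis25-lang/New_Learing_Python | Practicas/Practica_de_examen.py | contador_while
-- ===== SOURCE A (Python) =====
-- def contador_while(limite):
--     i = 1
--     contador = []
--     suma = 0
--     while i <= limite:
--         contador.append(i)
--         i = i + 1
--     for dato in contador:
--         suma = suma + dato
--     resultado = '+'.join(map(str, contador))
--     return f"({resultado}) \nLa suma total es: {suma}"
-- ===== SOURCE B (Python) =====
-- def contador_while(limite):
--     n = max(limite, 0)
--     contador = list(range(1, limite + 1))
--     suma = n * (n + 1) // 2
--     resultado = '+'.join(map(str, contador))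
--     return f"({resultado}) \nLa suma total es: {suma}"
-- ===== Notes on version B (the rewrite author's own statement) =====
-- stated objective: simpler
-- what changed: The while-loop list construction becomes list(range(...)) and the summation loop is replaced by the closed form n*(n+1)//2 with n = max(limite, 0).
import Mathlib
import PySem

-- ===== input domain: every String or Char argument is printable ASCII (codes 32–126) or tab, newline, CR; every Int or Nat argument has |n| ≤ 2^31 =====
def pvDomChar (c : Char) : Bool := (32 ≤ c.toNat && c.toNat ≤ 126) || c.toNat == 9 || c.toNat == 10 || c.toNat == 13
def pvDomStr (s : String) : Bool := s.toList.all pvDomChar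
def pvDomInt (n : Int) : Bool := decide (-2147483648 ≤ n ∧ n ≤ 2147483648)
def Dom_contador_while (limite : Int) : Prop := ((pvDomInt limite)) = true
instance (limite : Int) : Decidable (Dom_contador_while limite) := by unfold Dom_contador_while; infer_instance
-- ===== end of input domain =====

-- B replaces the accumulation loop by the closed form n*(n+1)//2 (simpler); list+join stay O(n).

-- ===== PORT A =====
-- the while loop: append i while i <= limite (fuel = the number of remaining iterations)
def pvLoopA (limite : Int) : Nat → Int → List Int → List Int
  | 0, _, acc => acc
  | fuel + 1, i, acc => if i ≤ limite then pvLoopA limite fuel (i + 1) (acc ++ [i]) else acc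

def contador_while (limite : Int) : String :=
  let contador := pvLoopA limite (limite + 1 - 1).toNat 1 []
  let suma := contador.foldl (fun s d => s + d) 0
  let resultado := PySem.Str.join "+" (contador.map PySem.Int.toStr)
  "(" ++ resultado ++ ") \nLa suma total es: " ++ PySem.Int.toStr suma

-- ===== PORT B =====
def contador_while_alt (limite : Int) : String :=
  let n := max limite 0
  let contador := PySem.List.pyRange 1 (limite + 1) 1
  let suma := PySem.Int.floordiv (n * (n + 1)) 2
  let resultado := PySem.Str.join "+" (contador.map PySem.Int.toStr)
  "(" ++ resultado ++ ") \nLa suma total es: " ++ PySem.Int.toStr suma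

-- ===== PRECONDITION & SPEC =====
def Spec_contador_while (limite : Int) (out : String) : Prop := out = contador_while_alt limite
instance (limite : Int) (out : String) : Decidable (Spec_contador_while limite out) := by unfold Spec_contador_while; infer_instance

-- ===== CLAIM (what is proved, stated in full; the proofs are below) =====
def Claim_equal_contador_while : Prop := ∀ (limite : Int), Dom_contador_while limite → Spec_contador_while limite (contador_while limite)

-- ===== LEMMAS AND PROOFS =====

-- A's while loop builds acc ++ range(i, limite+1)
theorem pvLoopA_eq (limite : Int) : ∀ (fuel : Nat) (i : Int) (acc : List Int),
    (limite + 1 - i).toNat ≤ fuel →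
    pvLoopA limite fuel i acc = acc ++ PySem.List.pyRange i (limite + 1) 1 := by
  intro fuel
  induction fuel with
  | zero =>
    intro i acc h
    rw [pvLoopA, PySem.List.pyRange_one_eq_nil (by omega)]
    simp
  | succ k ih =>
    intro i acc h
    rw [pvLoopA]
    by_cases hi : i ≤ limite
    · have hr : PySem.List.pyRange i (limite + 1) 1 = i :: PySem.List.pyRange (i + 1) (limite + 1) 1 :=
        PySem.List.pyRange_one_cons (by omega)
      rw [if_pos hi, ih (i + 1) (acc ++ [i]) (by omega), hr]
      simp
    · rw [if_neg hi, PySem.List.pyRange_one_eq_nil (by omega)]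
      simp

-- closed form for the sum over range(1, m+1)
theorem sum_pyRange_nat (m : Nat) :
    (PySem.List.pyRange 1 ((m : Int) + 1) 1).foldl (fun s d => s + d) 0
      = PySem.Int.floordiv ((m : Int) * ((m : Int) + 1)) 2 := by
  induction m with
  | zero =>
    rw [PySem.List.pyRange_one_eq_nil (by omega)]
    simp [PySem.Int.floordiv]
  | succ k ih =>
    have h1 : ((k + 1 : Nat) : Int) + 1 = ((k : Int) + 1) + 1 := by push_cast; ring
    rw [h1, PySem.List.pyRange_one_succ_right (by omega), List.foldl_append, ih]
    simp only [List.foldl_cons, List.foldl_nil]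
    rw [PySem.Int.floordiv_eq_ediv_of_pos (by omega), PySem.Int.floordiv_eq_ediv_of_pos (by omega)]
    have h2 : ((k : Int) + 1) * (((k : Int) + 1) + 1) = (k : Int) * ((k : Int) + 1) + 2 * ((k : Int) + 1) := by ring
    push_cast
    omega

theorem sum_pyRange (limite : Int) :
    (PySem.List.pyRange 1 (limite + 1) 1).foldl (fun s d => s + d) 0
      = PySem.Int.floordiv (max limite 0 * (max limite 0 + 1)) 2 := by
  by_cases h : limite ≤ 0
  · rw [PySem.List.pyRange_one_eq_nil (by omega)]
    have : max limite 0 = 0 := by omega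
    simp [this, PySem.Int.floordiv]
  · obtain ⟨m, hm⟩ : ∃ m : Nat, limite = (m : Int) := ⟨limite.toNat, by omega⟩
    have hmax : max limite 0 = limite := by omega
    rw [hmax, hm, sum_pyRange_nat]

-- ===== VERDICT (by name: the statement is the Claim_ definition above) =====
theorem contador_while_spec : Claim_equal_contador_while := by
  intro limite _
  unfold Spec_contador_while
  simp only [contador_while, contador_while_alt]
  rw [pvLoopA_eq limite (limite + 1 - 1).toNat 1 [] (le_refl _), List.nil_append, sum_pyRange]
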